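-- pv_equiv track=rewrite | github.com/AbhignaNagaraj/Combined-Sequence-and-structural-Protein-Aggregation-Mutation-Suggestion-Pipeline | Aggregation_Mutation.py | sequence_aggregation
-- ===== SOURCE A (Python) =====
-- STRONGLY_HYDROPHOBIC = set("AILMFWVY")
--
-- def sequence_aggregation(sequence, min_run=4):
--     flags = [0] * len(sequence)
--     start = None
--
--     for i, aa in enumerate(sequence):
--         if aa in STRONGLY_HYDROPHOBIC:
--             start = i if start is None else start
--         else:
--             if start is not None and i - start >= min_run:
--                 for j in range(start, i):
--                     flags[j] = 1
--             start = None
--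
--     if start is not None and len(sequence) - start >= min_run:
--         for j in range(start, len(sequence)):
--             flags[j] = 1
--
--     return flags
-- ===== SOURCE B (Python) =====
-- from itertools import groupby
--
-- STRONGLY_HYDROPHOBIC = set("AILMFWVY")
--
-- def sequence_aggregation(sequence, min_run=4):
--     flags = []
--     for is_hydro, group in groupby(sequence, key=lambda aa: aa in STRONGLY_HYDROPHOBIC):
--         n = sum(1 for _ in group)
--         flags.extend([1] * n if is_hydro and n >= min_run else [0] * n)
--     return flags
-- ===== Notes on version B (the rewrite author's own statement) =====
-- stated objective: simpler
-- what changed: Replaces A's index/start-sentinel state machine with end-of-run flush logic (duplicated after the loop) by a single itertools.groupby pass that emits a block of 1s or 0s per run, with no index bookkeeping and no trailing special case.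
import Mathlib
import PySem

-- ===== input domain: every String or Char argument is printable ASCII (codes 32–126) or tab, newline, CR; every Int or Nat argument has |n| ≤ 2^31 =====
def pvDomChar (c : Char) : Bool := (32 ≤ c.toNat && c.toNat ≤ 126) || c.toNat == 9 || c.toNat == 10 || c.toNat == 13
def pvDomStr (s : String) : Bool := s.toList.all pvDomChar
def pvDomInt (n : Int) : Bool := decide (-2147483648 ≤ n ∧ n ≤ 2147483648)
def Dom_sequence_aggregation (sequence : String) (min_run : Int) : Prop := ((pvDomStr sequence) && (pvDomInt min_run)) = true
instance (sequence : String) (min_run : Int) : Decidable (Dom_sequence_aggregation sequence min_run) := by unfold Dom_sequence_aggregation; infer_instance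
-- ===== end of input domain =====

-- B replaces A's index/start-sentinel state machine (with its duplicated trailing flush)
-- by one groupby pass emitting a block of 1s or 0s per run; objective: simpler.

-- shared module-level constant: STRONGLY_HYDROPHOBIC membership test
def pvHydro (c : Char) : Bool := ['A','I','L','M','F','W','V','Y'].contains c

-- ===== PORT A =====
-- 'for j in range(start, i): flags[j] = 1'  (indices are the Nats range(start, i), always in range)
def pvSetOnes (flags : List Int) (a len : Nat) : List Int :=
  (List.range' a len).foldl (fun f j => f.set j 1) flags

-- the body of 'for i, aa in enumerate(sequence)'
def pvStepA (min_run : Int) (st : List Int × Option Nat) (p : Nat × Char) : List Int × Option Nat :=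
  if pvHydro p.2 then
    (st.1, some (match st.2 with | none => p.1 | some s => s))
  else
    match st.2 with
    | some s =>
      (if min_run ≤ (p.1 : Int) - (s : Int) then pvSetOnes st.1 s (p.1 - s) else st.1, none)
    | none => (st.1, none)

-- enumerate(sequence), indices starting at p
def pvEnum (p : Nat) : List Char → List (Nat × Char)
  | [] => []
  | c :: cs => (p, c) :: pvEnum (p + 1) cs

-- the trailing 'if start is not None and len(sequence) - start >= min_run' flush
def pvFinA (min_run : Int) (total : Nat) (st : List Int × Option Nat) : List Int :=
  match st.2 with
  | some s => if min_run ≤ (total : Int) - (s : Int) then pvSetOnes st.1 s (total - s) else st.1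
  | none => st.1

def sequence_aggregation (sequence : String) (min_run : Int) : List Int :=
  let cs := sequence.toList
  pvFinA min_run cs.length
    ((pvEnum 0 cs).foldl (pvStepA min_run) (List.replicate cs.length 0, none))

-- ===== PORT B =====
-- one groupby pass: for each maximal run of equal hydrophobicity emit a block of 1s or 0s
def pvGroups (min_run : Int) : List Char → List Int
  | [] => []
  | c :: cs =>
    let k := pvHydro c
    let grp := (c :: cs).takeWhile (fun x => pvHydro x == k)
    let rest := (c :: cs).dropWhile (fun x => pvHydro x == k)
    List.replicate grp.length (if k ∧ min_run ≤ (grp.length : Int) then (1 : Int) else 0)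
      ++ pvGroups min_run rest
  termination_by cs => cs.length
  decreasing_by
    rw [List.dropWhile_cons_of_pos (by simp)]
    exact Nat.lt_succ_of_le (List.length_dropWhile_le _ _)

def sequence_aggregation_alt (sequence : String) (min_run : Int) : List Int :=
  pvGroups min_run sequence.toList

-- ===== PRECONDITION & SPEC =====
def Spec_sequence_aggregation (sequence : String) (min_run : Int) (out : List Int) : Prop := out = sequence_aggregation_alt sequence min_run
instance (sequence : String) (min_run : Int) (out : List Int) : Decidable (Spec_sequence_aggregation sequence min_run out) := by unfold Spec_sequence_aggregation; infer_instance

-- ===== CLAIM (what is proved, stated in full; the proofs are below) =====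
def Claim_equal_sequence_aggregation : Prop := ∀ (sequence : String) (min_run : Int), Dom_sequence_aggregation sequence min_run → Spec_sequence_aggregation sequence min_run (sequence_aggregation sequence min_run)

-- ===== LEMMAS AND PROOFS =====

theorem pvGroups_nil (m : Int) : pvGroups m [] = [] := by
  unfold pvGroups
  rfl

theorem pvGroups_cons (m : Int) (c : Char) (cs : List Char) :
    pvGroups m (c :: cs) =
      List.replicate ((c::cs).takeWhile (fun x => pvHydro x == pvHydro c)).length
        (if pvHydro c ∧ m ≤ (((c::cs).takeWhile (fun x => pvHydro x == pvHydro c)).length : Int) then (1:Int) else 0)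
      ++ pvGroups m ((c::cs).dropWhile (fun x => pvHydro x == pvHydro c)) := by
  rw [pvGroups]

theorem pvEnum_append (p : Nat) (xs ys : List Char) :
    pvEnum p (xs ++ ys) = pvEnum p xs ++ pvEnum (p + xs.length) ys := by
  induction xs generalizing p with
  | nil => simp [pvEnum]
  | cons c cs ih => simp [pvEnum, ih, Nat.add_assoc, Nat.add_comm 1 cs.length]

-- writing 1s over exactly the middle block
theorem pvSetOnes_fill (x : List Int) : ∀ (f0 tail : List Int),
    pvSetOnes (f0 ++ x ++ tail) f0.length x.length = f0 ++ List.replicate x.length 1 ++ tail := by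
  induction x with
  | nil => simp [pvSetOnes]
  | cons y ys ih =>
    intro f0 tail
    have h1 : List.range' f0.length (ys.length + 1) = f0.length :: List.range' (f0.length + 1) ys.length := by
      simp [List.range'_succ]
    have hset : (f0 ++ (y :: ys) ++ tail).set f0.length 1 = (f0 ++ [1]) ++ ys ++ tail := by
      rw [List.append_assoc, List.set_append_right _ _ (le_refl _)]
      simp
    have := ih (f0 ++ [1]) tail
    simp only [pvSetOnes, List.length_cons, h1, List.foldl_cons, hset]
    simp only [pvSetOnes, List.length_append, List.length_singleton] at this
    rw [this]
    simp [List.replicate_succ]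

-- non-hydrophobic chars with start = None: the loop does nothing
theorem pvLoop_nonhydro (min_run : Int) : ∀ (cs : List Char) (p : Nat) (flags : List Int),
    (∀ c ∈ cs, pvHydro c = false) →
    (pvEnum p cs).foldl (pvStepA min_run) (flags, none) = (flags, none) := by
  intro cs
  induction cs with
  | nil => intro p flags _; simp [pvEnum]
  | cons c cs ih =>
    intro p flags h
    have hc : pvHydro c = false := h c (by simp)
    simp [pvEnum, pvStepA, hc]
    exact ih (p + 1) flags (fun d hd => h d (by simp [hd]))

-- hydrophobic chars with start = some s: state unchanged
theorem pvLoop_hydro (min_run : Int) : ∀ (cs : List Char) (p s : Nat) (flags : List Int),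
    (∀ c ∈ cs, pvHydro c = true) →
    (pvEnum p cs).foldl (pvStepA min_run) (flags, some s) = (flags, some s) := by
  intro cs
  induction cs with
  | nil => intro p s flags _; simp [pvEnum]
  | cons c cs ih =>
    intro p s flags h
    have hc : pvHydro c = true := h c (by simp)
    simp [pvEnum, pvStepA, hc]
    exact ih (p + 1) s flags (fun d hd => h d (by simp [hd]))

theorem pvDropWhile_head (p : Char → Bool) : ∀ (cs : List Char),
    ∀ c rest, cs.dropWhile p = c :: rest → p c = false := by
  intro cs
  induction cs with
  | nil => intro c rest h; simp [List.dropWhile] at h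
  | cons a as ih =>
    intro c rest h
    by_cases ha : p a
    · rw [List.dropWhile_cons_of_pos ha] at h; exact ih c rest h
    · rw [List.dropWhile_cons_of_neg ha] at h
      cases h; simpa using ha

-- the main invariant: the loop over a suffix (fresh all-zero cells, no open run) followed
-- by the trailing flush produces the prefix unchanged plus B's groups for the suffix
theorem pvMain (min_run : Int) : ∀ (n : Nat) (cs : List Char), cs.length ≤ n → ∀ (f0 : List Int),
    pvFinA min_run (f0.length + cs.length)
      ((pvEnum f0.length cs).foldl (pvStepA min_run) (f0 ++ List.replicate cs.length 0, none))
    = f0 ++ pvGroups min_run cs := by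
  intro n
  induction n with
  | zero =>
    intro cs hlen f0
    have : cs = [] := List.eq_nil_of_length_eq_zero (Nat.le_zero.mp hlen)
    subst this
    simp [pvEnum, pvFinA, pvGroups_nil]
  | succ n ih =>
    intro cs hlen f0
    cases cs with
    | nil => simp [pvEnum, pvFinA, pvGroups_nil]
    | cons c cs' =>
      simp only [List.length_cons] at hlen
      set pr : Char → Bool := fun x => pvHydro x == pvHydro c with hpr
      have hsplit : (c :: cs').takeWhile pr ++ (c :: cs').dropWhile pr = c :: cs' :=
        List.takeWhile_append_dropWhile
      set grp := (c :: cs').takeWhile pr with hgrp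
      set rest := (c :: cs').dropWhile pr with hrest
      have hgrp_cons : grp = c :: cs'.takeWhile pr := by
        rw [hgrp, List.takeWhile_cons_of_pos (by simp [hpr])]
      have hgpos : 0 < grp.length := by rw [hgrp_cons]; simp
      have hlen_sum : grp.length + rest.length = cs'.length + 1 := by
        have := congrArg List.length hsplit
        simpa [Nat.add_comm] using this
      have hrest_len : rest.length ≤ n := by omega
      have hgrp_mem : ∀ x ∈ grp, pvHydro x = pvHydro c := by
        intro x hx
        have := List.mem_takeWhile_imp (hgrp ▸ hx)
        simpa [hpr] using this
      set g := grp.length with hg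
      set v : Int := if pvHydro c ∧ min_run ≤ (g : Int) then 1 else 0 with hv
      have hB : pvGroups min_run (c :: cs') = List.replicate g v ++ pvGroups min_run rest := by
        rw [pvGroups_cons]
      have hflags : f0 ++ List.replicate (c :: cs').length 0 =
          (f0 ++ List.replicate g (0:Int)) ++ List.replicate rest.length 0 := by
        rw [List.append_assoc, ← List.replicate_add]
        congr 2
        simp [hlen_sum]
      have henum : pvEnum f0.length (c :: cs') =
          pvEnum f0.length grp ++ pvEnum (f0.length + g) rest := by
        conv_lhs => rw [← hsplit]
        rw [pvEnum_append]
      have htot : f0.length + (c :: cs').length = (f0.length + g) + rest.length := by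
        simp only [List.length_cons]; omega
      by_cases hk : pvHydro c
      · -- hydrophobic group: after the group the state is (flags, some f0.length)
        have hgrp_all : ∀ x ∈ grp, pvHydro x = true := fun x hx => by rw [hgrp_mem x hx]; exact hk
        have hstep1 : ∀ flags : List Int,
            (pvEnum f0.length grp).foldl (pvStepA min_run) (flags, none) = (flags, some f0.length) := by
          intro flags
          rw [hgrp_cons]
          simp only [pvEnum, List.foldl_cons, pvStepA, hk]
          exact pvLoop_hydro min_run _ _ _ _ (fun d hd => hgrp_all d (by rw [hgrp_cons]; simp [hd]))
        have hfill : pvSetOnes ((f0 ++ List.replicate g (0:Int)) ++ List.replicate rest.length 0) f0.length g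
            = (f0 ++ List.replicate g (1:Int)) ++ List.replicate rest.length 0 := by
          have := pvSetOnes_fill (List.replicate g (0:Int)) f0 (List.replicate rest.length 0)
          simpa [List.append_assoc] using this
        cases hre : rest with
        | nil =>
          rw [hflags, henum, List.foldl_append, hstep1, hre]
          simp only [pvEnum, List.foldl_nil, pvFinA]
          have hclen : (c :: cs').length = g := by rw [hre] at hlen_sum; simpa using hlen_sum.symm
          have hcast : ((f0.length + (c :: cs').length : Nat) : Int) - (f0.length : Int) = (g : Int) := by
            rw [hclen]; push_cast; ring
          have hsub : f0.length + (c :: cs').length - f0.length = g := by omega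
          rw [hcast, hsub, hB, hre]
          by_cases hm : min_run ≤ (g : Int)
          · rw [if_pos hm]
            have hfill' := hfill
            rw [hre] at hfill'
            simp only [List.length_nil, List.replicate_zero, List.append_nil] at hfill'
            simp only [List.length_nil, List.replicate_zero, List.append_nil]
            rw [hfill']
            have hv1 : v = 1 := by rw [hv, if_pos ⟨hk, hm⟩]
            rw [hv1]
            simp [pvGroups_nil]
          · rw [if_neg hm]
            have hv0 : v = 0 := by rw [hv, if_neg (by tauto)]
            rw [hv0]
            simp [pvGroups_nil]
        | cons c2 rest' =>
          have hc2 : pvHydro c2 = false := by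
            have := pvDropWhile_head pr (c :: cs') c2 rest' (by rw [← hrest, hre])
            simpa [hpr, hk] using this
          set F' := (f0 ++ List.replicate g v) ++ List.replicate rest.length (0:Int) with hF'
          have hunfold : pvEnum (f0.length + g) rest
              = (f0.length + g, c2) :: pvEnum (f0.length + g + 1) rest' := by
            rw [hre]; rfl
          have hcast : ((f0.length + g : Nat) : Int) - (f0.length : Int) = (g : Int) := by
            push_cast; ring
          have hsub : f0.length + g - f0.length = g := by omega
          have hfirst : pvStepA min_run
              ((f0 ++ List.replicate g (0:Int)) ++ List.replicate rest.length 0, some f0.length)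
              (f0.length + g, c2) = (F', none) := by
            simp only [pvStepA, hc2, Bool.false_eq_true, if_false, hcast, hsub]
            by_cases hm : min_run ≤ (g : Int)
            · rw [if_pos hm]
              have hv1 : v = 1 := by rw [hv, if_pos ⟨hk, hm⟩]
              rw [hF', hv1]
              exact congrArg (fun z => (z, none)) hfill
            · rw [if_neg hm]
              have hv0 : v = 0 := by rw [hv, if_neg (by tauto)]
              rw [hF', hv0]
          have hsecond : pvStepA min_run (F', none) (f0.length + g, c2) = (F', none) := by
            simp [pvStepA, hc2]
          have hstep2 : (pvEnum (f0.length + g) rest).foldl (pvStepA min_run)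
              ((f0 ++ List.replicate g (0:Int)) ++ List.replicate rest.length 0, some f0.length)
              = (pvEnum (f0.length + g) rest).foldl (pvStepA min_run) (F', none) := by
            rw [hunfold]
            simp only [List.foldl_cons]
            rw [hfirst, hsecond]
          rw [hflags, henum, List.foldl_append, hstep1, hstep2]
          have ihr := ih rest hrest_len (f0 ++ List.replicate g v)
          have hplen : (f0 ++ List.replicate g v).length = f0.length + g := by simp
          rw [hplen] at ihr
          rw [hF', htot, ihr, hB]
          simp
      · -- non-hydrophobic group: the loop ignores it
        have hgrp_all : ∀ x ∈ grp, pvHydro x = false := fun x hx => by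
          rw [hgrp_mem x hx]; simpa using hk
        rw [hflags, henum, List.foldl_append,
          pvLoop_nonhydro min_run grp f0.length _ hgrp_all]
        have ihr := ih rest hrest_len (f0 ++ List.replicate g (0:Int))
        have hplen : (f0 ++ List.replicate g (0:Int)).length = f0.length + g := by simp
        rw [hplen] at ihr
        rw [htot, ihr, hB]
        have hv0 : v = 0 := by rw [hv, if_neg (by tauto)]
        rw [hv0]
        simp

-- ===== VERDICT (by name: the statement is the Claim_ definition above) =====
theorem sequence_aggregation_spec : Claim_equal_sequence_aggregation := by
  intro sequence min_run _
  unfold Spec_sequence_aggregation sequence_aggregation sequence_aggregation_alt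
  have := pvMain min_run sequence.toList.length sequence.toList (le_refl _) []
  simpa using this
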